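-- pv_equiv track=rewrite | github.com/techeer-sv/Surviving-the-Code | kihong/week8/BOJ2212.py | solve
-- ===== SOURCE A (Python) =====
-- def solve(_list: list, n, k):
--     # k가 n보다 크거나 같으면, 모든 센서를 각각 1개의 집중국으로 커버 가능.
--     if k >= n:
--         return 0
--
--     _list.sort()
--     # 인접한 센서 간의 거리를 계산하여, 각 간격이 최소화하게 함.
--     gaps = []
--     for i in range(1, n):
--         gap = _list[i] - _list[i - 1]
--         gaps.append(gap)
--
--     gaps.sort(reverse=True)
--
--     return sum(gaps[k - 1 :])
-- ===== SOURCE B (Python) =====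
-- def _sum_smallest(vals, m):
--     # sum of the m smallest values of vals (everything if m >= len(vals), 0 if m <= 0),
--     # by three-way-partition quickselect around a middle pivot -- no sorting of vals
--     if m <= 0:
--         return 0
--     if m >= len(vals):
--         return sum(vals)
--     pivot = vals[len(vals) // 2]
--     lo = [v for v in vals if v < pivot]
--     eq = [v for v in vals if v == pivot]
--     hi = [v for v in vals if v > pivot]
--     if m <= len(lo):
--         return _sum_smallest(lo, m)
--     if m <= len(lo) + len(eq):
--         return sum(lo) + (m - len(lo)) * pivot
--     return sum(lo) + sum(eq) + _sum_smallest(hi, m - len(lo) - len(eq))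
--
--
-- def solve(_list: list, n, k):
--     # Every station covers one sensor when k >= n.
--     if k >= n:
--         return 0
--
--     _list.sort()
--     # k stations cover k contiguous runs of sensors: the k-1 widest adjacent gaps are
--     # left uncovered, so the answer is the sum of the n-k smallest adjacent gaps.
--     gaps = [_list[i] - _list[i - 1] for i in range(1, n)]
--     return _sum_smallest(gaps, n - k)
-- ===== Notes on version B (the rewrite author's own statement) =====
-- stated objective: alternative
-- what changed: B computes the answer as the sum of the n-k smallest adjacent gaps by a hand-written three-way-partition quickselect over the gap list (expected linear in the number of gaps), instead of A's full descending sort of the gaps followed by summing a suffix slice.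
-- intended difference: For k <= 0 with 2 < n + k and the sensors not all at one coordinate, A's slice gaps[k-1:] wraps around to a negative index and returns only the sum of the 1-k smallest gaps, while B returns the full span (cutting no gap when there are no stations to spare), which is the intended value of 'cut the k-1 largest gaps'. — e.g. on solve([0, 1, 3], 3, 0): A returns 1, B returns 3
import Mathlib
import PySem

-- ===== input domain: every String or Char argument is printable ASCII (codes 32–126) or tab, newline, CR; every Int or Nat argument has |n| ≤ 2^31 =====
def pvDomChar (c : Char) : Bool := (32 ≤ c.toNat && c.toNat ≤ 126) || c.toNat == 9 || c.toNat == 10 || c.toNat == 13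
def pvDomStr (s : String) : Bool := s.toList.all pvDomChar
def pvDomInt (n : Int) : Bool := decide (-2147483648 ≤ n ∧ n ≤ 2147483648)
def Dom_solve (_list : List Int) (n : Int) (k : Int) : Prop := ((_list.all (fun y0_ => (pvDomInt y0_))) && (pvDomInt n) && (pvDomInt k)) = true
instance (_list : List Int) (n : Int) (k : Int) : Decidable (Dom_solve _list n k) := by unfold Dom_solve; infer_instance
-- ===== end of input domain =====

-- B computes "sum of the n-k smallest adjacent gaps" by a three-way-partition quickselect over
-- the gap list instead of A's full descending sort of the gaps and suffix sum (objective: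
-- alternative). Both Pythons sort _list in place; the equivalence proved here is about the
-- return value only.

-- ===== PORT A =====
-- _list[i] / _list[i-1]: Python raises IndexError when out of range; pyGetD with default 0 is
-- used and Pre_solve excludes exactly those inputs.
def pvGap (s : List Int) (i : Int) : Int :=
  PySem.List.pyGetD s i 0 - PySem.List.pyGetD s (i - 1) 0

def solve (_list : List Int) (n : Int) (k : Int) : Int :=
  if n ≤ k then 0
  else
    let s := PySem.List.sorted _list (fun x => x) false
    let gaps := (PySem.List.pyRange 1 n 1).foldl (fun acc i => acc ++ [pvGap s i]) []
    let gd := PySem.List.sorted gaps (fun x => x) true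
    (PySem.List.slice gd (some (k - 1)) none).sum

-- ===== PORT B =====
-- two facts the port itself cites in its decreasing_by (termination of the quickselect)
theorem pv_filter_length_lt {p : Int → Bool} {l : List Int} {x : Int}
    (hx : x ∈ l) (hpx : p x = false) : (l.filter p).length < l.length := by
  induction l with
  | nil => cases hx
  | cons a t ih =>
    rcases List.mem_cons.mp hx with rfl | hx
    · rw [List.filter_cons, if_neg (by rw [hpx]; simp)]
      have := List.length_filter_le p t
      simp only [List.length_cons]
      omega
    · by_cases hpa : p a = true
      · rw [List.filter_cons, if_pos hpa]
        simp only [List.length_cons]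
        exact Nat.succ_lt_succ (ih hx)
      · rw [List.filter_cons, if_neg (by simpa using hpa)]
        have := ih hx
        simp only [List.length_cons]
        omega

theorem pv_pivot_mem (vals : List Int) (h : vals ≠ []) :
    PySem.List.pyGetD vals (PySem.Int.floordiv (vals.length : Int) 2) 0 ∈ vals := by
  have h2 : PySem.Int.floordiv (vals.length : Int) 2 = ((vals.length / 2 : Nat) : Int) := by
    exact_mod_cast PySem.Int.floordiv_natCast vals.length 2
  rw [h2, PySem.List.pyGetD_natCast]
  have hl : vals.length / 2 < vals.length :=
    Nat.div_lt_self (List.length_pos_of_ne_nil h) (by omega)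
  rw [List.getD_eq_getElem _ _ hl]
  exact List.getElem_mem _

theorem pv_attach_filter_length_lt (vals : List Int) (q : Int → Bool) (x : Int)
    (hx : x ∈ vals) (hqx : q x = false) :
    (vals.attach.filter (fun a => q a.1)).length < vals.length := by
  have h : (vals.attach.filter (fun a => q a.1)).length = (vals.filter q).length := by
    rw [← List.countP_eq_length_filter, ← List.countP_eq_length_filter]
    exact List.countP_attach
  rw [h]
  exact pv_filter_length_lt hx hqx

-- B's hand-written helper: sum of the m smallest values of vals (everything if m ≥ len(vals),
-- 0 if m ≤ 0), by three-way-partition quickselect around a middle pivot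
def pvSumSmallest (vals : List Int) (m : Int) : Int :=
  if hm : m ≤ 0 then 0
  else if hlen : (vals.length : Int) ≤ m then vals.sum
  else
    let pivot := PySem.List.pyGetD vals (PySem.Int.floordiv (vals.length : Int) 2) 0
    let lo := vals.filter (fun v => v < pivot)
    let eqs := vals.filter (fun v => v == pivot)
    let hi := vals.filter (fun v => pivot < v)
    if m ≤ (lo.length : Int) then pvSumSmallest lo m
    else if m ≤ (lo.length : Int) + (eqs.length : Int) then
      lo.sum + (m - (lo.length : Int)) * pivot
    else
      lo.sum + eqs.sum + pvSumSmallest hi (m - (lo.length : Int) - (eqs.length : Int))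
termination_by vals.length
decreasing_by
  · simp only [List.length_unattach]
    exact pv_attach_filter_length_lt vals
      (fun v => decide (v < PySem.List.pyGetD vals (PySem.Int.floordiv (vals.length : Int) 2) 0))
      (PySem.List.pyGetD vals (PySem.Int.floordiv (vals.length : Int) 2) 0)
      (pv_pivot_mem vals (by intro he; rw [he] at hlen; simp at hlen; omega))
      (by simp)
  · simp only [List.length_unattach]
    exact pv_attach_filter_length_lt vals
      (fun v => decide (PySem.List.pyGetD vals (PySem.Int.floordiv (vals.length : Int) 2) 0 < v))
      (PySem.List.pyGetD vals (PySem.Int.floordiv (vals.length : Int) 2) 0)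
      (pv_pivot_mem vals (by intro he; rw [he] at hlen; simp at hlen; omega))
      (by simp)

def solve_alt (_list : List Int) (n : Int) (k : Int) : Int :=
  if n ≤ k then 0
  else
    let s := PySem.List.sorted _list (fun x => x) false
    let gaps := (PySem.List.pyRange 1 n 1).map (fun i => pvGap s i)
    pvSumSmallest gaps (n - k)

-- ===== PRECONDITION & SPEC =====
-- Pre_solve excludes exactly the inputs where A raises IndexError: k < n, 2 ≤ n and n > len(_list).
def Pre_solve (_list : List Int) (n : Int) (k : Int) : Prop :=
  n ≤ k ∨ n ≤ (_list.length : Int) ∨ n < 2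
instance (_list : List Int) (n : Int) (k : Int) : Decidable (Pre_solve _list n k) := by
  unfold Pre_solve; infer_instance

def pvWitness_solve : List Int × Int × Int := ([0, 1, 3], 3, 2)

-- For k ≤ 0 with 2 < n + k (and the sensors not all at one coordinate, so that some gap is
-- positive), A's slice gaps[k-1:] wraps around to a negative index and returns the sum of only
-- the 1-k smallest gaps, while B returns the full span (no gap is cut when there are no stations
-- to spare), which is the intended value of "cut the k-1 largest gaps".
def D_solve (_list : List Int) (n : Int) (k : Int) : Prop :=
  k ≤ 0 ∧ 2 < n + k ∧ ∃ x ∈ _list, (∀ y ∈ _list, x ≤ y) ∧ (_list.count x : Int) < n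
instance (_list : List Int) (n : Int) (k : Int) : Decidable (D_solve _list n k) := by
  unfold D_solve; infer_instance

def Spec_solve (_list : List Int) (n : Int) (k : Int) (out : Int) : Prop :=
  ¬ D_solve _list n k → out = solve_alt _list n k
instance (_list : List Int) (n : Int) (k : Int) (out : Int) : Decidable (Spec_solve _list n k out) := by
  unfold Spec_solve; infer_instance

def pvDiffWitness_solve : List Int × Int × Int := ([0, 1, 3], 3, 0)
def pvDiffWitnessOut_solve : Int × Int := (1, 3)

-- ===== CLAIM (what is proved, stated in full; the proofs are below) =====
def Claim_unchanged_solve : Prop := ∀ (_list : List Int) (n : Int) (k : Int), Dom_solve _list n k → Pre_solve _list n k → Spec_solve _list n k (solve _list n k)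
def Claim_exact_solve : Prop := ∀ (_list : List Int) (n : Int) (k : Int), Dom_solve _list n k → Pre_solve _list n k → D_solve _list n k → solve _list n k ≠ solve_alt _list n k
def Claim_changed_solve : Prop := Dom_solve (pvDiffWitness_solve.1) (pvDiffWitness_solve.2.1) (pvDiffWitness_solve.2.2) ∧ Pre_solve (pvDiffWitness_solve.1) (pvDiffWitness_solve.2.1) (pvDiffWitness_solve.2.2) ∧ D_solve (pvDiffWitness_solve.1) (pvDiffWitness_solve.2.1) (pvDiffWitness_solve.2.2) ∧ solve (pvDiffWitness_solve.1) (pvDiffWitness_solve.2.1) (pvDiffWitness_solve.2.2) = pvDiffWitnessOut_solve.1 ∧ solve_alt (pvDiffWitness_solve.1) (pvDiffWitness_solve.2.1) (pvDiffWitness_solve.2.2) = pvDiffWitnessOut_solve.2 ∧ pvDiffWitnessOut_solve.1 ≠ pvDiffWitnessOut_solve.2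

-- ===== LEMMAS AND PROOFS =====

theorem pv_sorted_rev_eq_reverse (xs : List Int) :
    PySem.List.sorted xs (fun x => x) true
      = (PySem.List.sorted xs (fun x => x) false).reverse := by
  refine PySem.List.eq_of_perm_of_pairwise_le_of_injective (fun x : Int => -x)
    (fun a b h => by simpa using h) ?_ ?_ ?_
  · exact (PySem.List.sorted_perm xs (fun x => x) true).trans
      ((PySem.List.sorted_perm xs (fun x => x) false).symm.trans
        (List.reverse_perm _).symm)
  · have := PySem.List.sorted_pairwise_rev (xs := xs) (key := fun x : Int => x)
    exact this.imp (by intro a b h; simpa using h)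
  · rw [List.pairwise_reverse]
    have := PySem.List.sorted_pairwise (xs := xs) (key := fun x : Int => x)
    exact this.imp (by intro a b h; simpa using h)

theorem pv_partition_perm (vals : List Int) (p : Int) :
    (vals.filter (fun v => v < p)
      ++ (vals.filter (fun v => v == p) ++ vals.filter (fun v => p < v))).Perm vals := by
  induction vals with
  | nil => simp
  | cons a t ih =>
    rcases lt_trichotomy a p with h | h | h
    · rw [List.filter_cons, if_pos (by simpa using h),
        List.filter_cons, if_neg (by simp; omega),
        List.filter_cons, if_neg (by simp; omega), List.cons_append]
      exact ih.cons a
    · rw [List.filter_cons, if_neg (by simp; omega),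
        List.filter_cons, if_pos (by simp [h]),
        List.filter_cons, if_neg (by simp; omega), List.cons_append]
      exact List.perm_middle.trans (ih.cons a)
    · rw [List.filter_cons, if_neg (by simp; omega),
        List.filter_cons, if_neg (by simp; omega),
        List.filter_cons, if_pos (by simpa using h)]
      refine (List.Perm.append (List.Perm.refl _) List.perm_middle).trans ?_
      exact List.perm_middle.trans (ih.cons a)

theorem pv_sum_const (l : List Int) (c : Int) (h : ∀ x ∈ l, x = c) :
    l.sum = (l.length : Int) * c := by
  induction l with
  | nil => simp
  | cons a t ih =>
    rw [List.sum_cons, ih (fun x hx => h x (by simp [hx])), h a (by simp),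
      List.length_cons]
    push_cast
    ring

theorem pv_sorted_partition (vals : List Int) (p : Int) :
    PySem.List.sorted vals (fun x => x) false
      = PySem.List.sorted (vals.filter (fun v => v < p)) (fun x => x) false
        ++ (vals.filter (fun v => v == p)
        ++ PySem.List.sorted (vals.filter (fun v => p < v)) (fun x => x) false) := by
  refine PySem.List.sorted_id_eq_of_perm_of_pairwise _ _ ?_ ?_
  · refine List.Perm.trans ?_ (pv_partition_perm vals p)
    exact (PySem.List.sorted_perm _ _ _).append
      ((List.Perm.refl _).append (PySem.List.sorted_perm _ _ _))
  · rw [List.pairwise_append]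
    refine ⟨?_, ?_, ?_⟩
    · simpa using PySem.List.sorted_pairwise
        (vals.filter (fun v => v < p)) (fun x : Int => x)
    · rw [List.pairwise_append]
      refine ⟨?_, ?_, ?_⟩
      case refine_2 =>
        simpa using PySem.List.sorted_pairwise
          (vals.filter (fun v => p < v)) (fun x : Int => x)
      · refine List.pairwise_of_forall_mem_list ?_
        intro a ha b hb
        have ha' : a = p := by simpa using (List.of_mem_filter ha)
        have hb' : b = p := by simpa using (List.of_mem_filter hb)
        omega
      · intro a ha b hb
        have ha' : a = p := by simpa using (List.of_mem_filter ha)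
        have hb' : p < b := by
          have := List.of_mem_filter ((PySem.List.mem_sorted _ _ _ _).mp hb)
          simpa using this
        omega
    · intro a ha b hb
      have ha' : a < p := by
        have := List.of_mem_filter ((PySem.List.mem_sorted _ _ _ _).mp ha)
        simpa using this
      rcases List.mem_append.mp hb with hb | hb
      · have hb' : b = p := by simpa using (List.of_mem_filter hb)
        omega
      · have hb' : p < b := by
          have := List.of_mem_filter ((PySem.List.mem_sorted _ _ _ _).mp hb)
          simpa using this
        omega

theorem pv_ssum_eq (N : Nat) (vals : List Int) (hN : vals.length ≤ N) (m : Int) :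
    pvSumSmallest vals m
      = ((PySem.List.sorted vals (fun x => x) false).take m.toNat).sum := by
  induction N generalizing vals m with
  | zero =>
    have hv : vals = [] := List.eq_nil_iff_length_eq_zero.mpr (by omega)
    subst hv
    rw [pvSumSmallest, (PySem.List.sorted_eq_nil_iff ([] : List Int) (fun x => x) false).mpr rfl]
    by_cases h1 : m ≤ 0
    · rw [dif_pos h1]; simp
    · rw [dif_neg h1, dif_pos (by simp; omega)]; simp
  | succ N ih =>
    rw [pvSumSmallest]
    by_cases h1 : m ≤ 0
    · rw [dif_pos h1]
      have : m.toNat = 0 := by omega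
      simp [this]
    · rw [dif_neg h1]
      by_cases h2 : (vals.length : Int) ≤ m
      · rw [dif_pos h2]
        rw [List.take_of_length_le (by rw [PySem.List.length_sorted]; omega)]
        exact ((PySem.List.sorted_perm vals (fun x => x) false).sum_eq).symm
      · rw [dif_neg h2]
        dsimp only
        set P := PySem.List.pyGetD vals (PySem.Int.floordiv (vals.length : Int) 2) 0 with hP
        set lo := vals.filter (fun v => v < P) with hlo
        set eqs := vals.filter (fun v => v == P) with heqs
        set hi := vals.filter (fun v => P < v) with hhi
        have hvne : vals ≠ [] := by
          intro he; rw [he] at h2; simp at h2; omega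
        have hPmem : P ∈ vals := pv_pivot_mem vals hvne
        have hlolt : lo.length < vals.length :=
          pv_filter_length_lt hPmem (by simp)
        have hhilt : hi.length < vals.length :=
          pv_filter_length_lt hPmem (by simp)
        have hsp := pv_sorted_partition vals P
        rw [← hlo, ← heqs, ← hhi] at hsp
        set A := PySem.List.sorted lo (fun x => x) false with hA
        set H := PySem.List.sorted hi (fun x => x) false with hH
        have hAlen : A.length = lo.length := PySem.List.length_sorted _ _ _
        have hHlen : H.length = hi.length := PySem.List.length_sorted _ _ _
        have hAsum : A.sum = lo.sum := (PySem.List.sorted_perm _ _ _).sum_eq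
        rw [hsp, List.take_append, List.take_append]
        by_cases h3 : m ≤ (lo.length : Int)
        · rw [if_pos h3, ih lo (by omega) m, ← hA]
          have hz : m.toNat - A.length = 0 := by omega
          simp only [hz, Nat.zero_sub, List.take_zero, List.nil_append,
            List.append_nil]
        · rw [if_neg h3]
          have htA : A.take m.toNat = A := List.take_of_length_le (by omega)
          by_cases h4 : m ≤ (lo.length : Int) + (eqs.length : Int)
          · rw [if_pos h4, htA]
            have htE : (eqs.take (m.toNat - A.length)).sum
                = ((m.toNat - A.length : Nat) : Int) * P := by
              rw [pv_sum_const _ P ?_, List.length_take]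
              · congr 1; omega
              · intro x hx
                have : x ∈ eqs := List.mem_of_mem_take hx
                simpa using (List.of_mem_filter this)
            have hz : m.toNat - A.length - eqs.length = 0 := by omega
            rw [hz, List.take_zero, List.append_nil, List.sum_append, htE, hAsum]
            have : ((m.toNat - A.length : Nat) : Int) = m - (lo.length : Int) := by omega
            rw [this]
          · rw [if_neg h4, htA,
              List.take_of_length_le (i := m.toNat - A.length) (by omega),
              ih hi (by omega) (m - (lo.length : Int) - (eqs.length : Int))]
            have : (m - (lo.length : Int) - (eqs.length : Int)).toNat
                = m.toNat - A.length - eqs.length := by omega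
            rw [this, List.sum_append, List.sum_append, ← hH, hAsum]
            ring

theorem pv_main (G : List Int) (n k : Int) (hnk : ¬ n ≤ k)
    (hG : G.length = (n - 1).toNat) (hnd : 1 ≤ k ∨ n + k ≤ 2) :
    (PySem.List.slice (PySem.List.sorted G (fun x => x) true) (some (k - 1)) none).sum
      = ((PySem.List.sorted G (fun x => x) false).take (n - k).toNat).sum := by
  set asc := PySem.List.sorted G (fun x => x) false with hasc
  have hlen : asc.length = G.length := PySem.List.length_sorted _ _ _
  have hsum : asc.sum = G.sum := (PySem.List.sorted_perm _ _ _).sum_eq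
  by_cases hk : 1 ≤ k
  · rw [pv_sorted_rev_eq_reverse, ← hasc,
      PySem.List.slice_from _ (by omega : (0:Int) ≤ k - 1)]
    have h1 : asc.reverse.drop (k - 1).toNat
        = (asc.take (asc.length - (k - 1).toNat)).reverse := by
      rw [List.reverse_take]
      congr 1
      omega
    rw [h1, List.sum_reverse]
    congr 2
    omega
  · rcases hnd with hnd | hnd
    · omega
    by_cases hn : n ≤ 1
    · have hGnil : G = [] := List.eq_nil_iff_length_eq_zero.mpr (by omega)
      subst hGnil
      rw [(PySem.List.sorted_eq_nil_iff ([] : List Int) (fun x => x) true).mpr rfl]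
      have hascnil : asc = [] := by
        rw [hasc]
        exact (PySem.List.sorted_eq_nil_iff ([] : List Int) (fun x => x) false).mpr rfl
      rw [hascnil, PySem.List.slice_some_none]
      simp
    · have hperm := PySem.List.sorted_perm G (fun x => x) true
      have hlen' : (PySem.List.sorted G (fun x => x) true).length = G.length :=
        PySem.List.length_sorted _ _ _
      have hkl : k - 1 = -(((1 - k).toNat : Int)) := by omega
      rw [PySem.List.slice_some_none, hkl,
        PySem.List.clampIdx_neg_natCast _ _ (by omega)]
      have h0 : (PySem.List.sorted G (fun x => x) true).length - (1 - k).toNat = 0 := by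
        omega
      rw [h0, List.drop_zero, hperm.sum_eq,
        List.take_of_length_le (by omega), hsum]


theorem pv_solveA (_list : List Int) (n k : Int) (hnk : ¬ n ≤ k) :
    solve _list n k
      = (PySem.List.slice
          (PySem.List.sorted
            ((PySem.List.pyRange 1 n 1).map
              (fun i => pvGap (PySem.List.sorted _list (fun x => x) false) i))
            (fun x => x) true)
          (some (k - 1)) none).sum := by
  simp only [solve, if_neg hnk]
  rw [PySem.List.foldl_append_singleton_eq_map, List.nil_append]

theorem pv_solveB (_list : List Int) (n k : Int) (hnk : ¬ n ≤ k) :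
    solve_alt _list n k
      = ((PySem.List.sorted
            ((PySem.List.pyRange 1 n 1).map
              (fun i => pvGap (PySem.List.sorted _list (fun x => x) false) i))
            (fun x => x) false).take (n - k).toNat).sum := by
  simp only [solve_alt, if_neg hnk]
  rw [pv_ssum_eq _ _ le_rfl]

theorem pv_sorted_count_prefix (s : List Int) (x : Int)
    (hpw : s.Pairwise (· ≤ ·)) (hlb : ∀ y ∈ s, x ≤ y) :
    ∀ j : Nat, j < s.count x → ∀ (h : j < s.length), s[j] = x := by
  induction s with
  | nil => intro j hj h; simp at h
  | cons a t ih =>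
    intro j hj hlen
    by_cases hax : a = x
    · subst hax
      cases j with
      | zero => simp
      | succ j =>
        have hpw' := List.pairwise_cons.mp hpw
        have hcnt : j < t.count a := by
          rw [List.count_cons] at hj
          simp at hj
          omega
        have := ih hpw'.2 (fun y hy => hlb y (by simp [hy])) j hcnt
          (by simpa using Nat.lt_of_succ_lt_succ hlen)
        simpa using this
    · have hxa : x < a := lt_of_le_of_ne (hlb a (by simp)) (fun e => hax e.symm)
      have h0 : t.count x = 0 := by
        rw [List.count_eq_zero]
        intro hxt
        have := (List.pairwise_cons.mp hpw).1 x hxt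
        omega
      rw [List.count_cons, h0, if_neg (by simp; omega)] at hj
      omega

theorem pv_gaps_zero (_list : List Int) (n : Int) (hlen : n ≤ (_list.length : Int))
    (x : Int) (hx : x ∈ _list) (hmin : ∀ y ∈ _list, x ≤ y)
    (hcnt : n ≤ (_list.count x : Int)) :
    ∀ g ∈ (PySem.List.pyRange 1 n 1).map
        (fun i => pvGap (PySem.List.sorted _list (fun x => x) false) i), g = 0 := by
  intro g hg
  obtain ⟨i, hi, rfl⟩ := List.mem_map.mp hg
  obtain ⟨hi1, hi2⟩ := (PySem.List.mem_pyRange_one).mp hi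
  set s := PySem.List.sorted _list (fun x => x) false with hsdef
  have hslen : s.length = _list.length := PySem.List.length_sorted _ _ _
  have hscnt : s.count x = _list.count x := (PySem.List.sorted_perm _ _ _).count_eq x
  have hpw : s.Pairwise (· ≤ ·) := by
    simpa using PySem.List.sorted_pairwise _list (fun x : Int => x)
  have hlb : ∀ y ∈ s, x ≤ y := fun y hy =>
    hmin y ((PySem.List.mem_sorted _ _ _ _).mp hy)
  have h1 : PySem.List.pyGetD s i 0 = s[i.toNat]'(by omega) :=
    PySem.List.pyGetD_eq_getElem s 0 (by omega) (by omega)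
  have h2 : PySem.List.pyGetD s (i - 1) 0 = s[(i - 1).toNat]'(by omega) :=
    PySem.List.pyGetD_eq_getElem s 0 (by omega) (by omega)
  have e1 : s[i.toNat]'(by omega) = x :=
    pv_sorted_count_prefix s x hpw hlb i.toNat (by omega) (by omega)
  have e2 : s[(i - 1).toNat]'(by omega) = x :=
    pv_sorted_count_prefix s x hpw hlb (i - 1).toNat (by omega) (by omega)
  simp only [pvGap, h1, h2, e1, e2, sub_self]

theorem pv_zero_main (G : List Int) (n k : Int) (hz : ∀ g ∈ G, g = 0) :
    (PySem.List.slice (PySem.List.sorted G (fun x => x) true) (some (k - 1)) none).sum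
      = ((PySem.List.sorted G (fun x => x) false).take (n - k).toNat).sum := by
  have h1 : ∀ y ∈ PySem.List.slice (PySem.List.sorted G (fun x => x) true)
      (some (k - 1)) none, y = 0 := by
    intro y hy
    exact hz y ((PySem.List.mem_sorted _ _ _ _).mp (PySem.List.mem_of_mem_slice _ _ _ hy))
  have h2 : ∀ y ∈ (PySem.List.sorted G (fun x => x) false).take (n - k).toNat, y = 0 := by
    intro y hy
    exact hz y ((PySem.List.mem_sorted _ _ _ _).mp (List.mem_of_mem_take hy))
  rw [pv_sum_const _ 0 h1, pv_sum_const _ 0 h2, mul_zero, mul_zero]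

theorem pv_gaps_nonneg (_list : List Int) (n : Int) (hlen : n ≤ (_list.length : Int)) :
    ∀ g ∈ (PySem.List.pyRange 1 n 1).map
        (fun i => pvGap (PySem.List.sorted _list (fun x => x) false) i), 0 ≤ g := by
  intro g hg
  obtain ⟨i, hi, rfl⟩ := List.mem_map.mp hg
  obtain ⟨hi1, hi2⟩ := (PySem.List.mem_pyRange_one).mp hi
  have hslen : (PySem.List.sorted _list (fun x => x) false).length = _list.length :=
    PySem.List.length_sorted _ _ _
  have h1 : PySem.List.pyGetD (PySem.List.sorted _list (fun x => x) false) i 0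
      = (PySem.List.sorted _list (fun x => x) false)[i.toNat]'(by omega) :=
    PySem.List.pyGetD_eq_getElem (PySem.List.sorted _list (fun x => x) false) 0
      (by omega) (by omega)
  have h2 : PySem.List.pyGetD (PySem.List.sorted _list (fun x => x) false) (i - 1) 0
      = (PySem.List.sorted _list (fun x => x) false)[(i - 1).toNat]'(by omega) :=
    PySem.List.pyGetD_eq_getElem (PySem.List.sorted _list (fun x => x) false) 0
      (by omega) (by omega)
  have hmono : (PySem.List.sorted _list (fun x => x) false)[(i - 1).toNat]'(by omega)
      ≤ (PySem.List.sorted _list (fun x => x) false)[i.toNat]'(by omega) :=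
    PySem.List.sorted_id_getElem_mono _list (by omega) (by omega)
  simp only [pvGap, h1, h2]
  omega

theorem pv_exists_pos_gap (_list : List Int) (n : Int) (hlen : n ≤ (_list.length : Int))
    (hn : 3 ≤ n) (x : Int) (hx : x ∈ _list) (hmin : ∀ y ∈ _list, x ≤ y)
    (hcnt : (_list.count x : Int) < n) :
    ∃ g ∈ (PySem.List.pyRange 1 n 1).map
        (fun i => pvGap (PySem.List.sorted _list (fun x => x) false) i), 0 < g := by
  by_contra hnp
  push_neg at hnp
  have hz : ∀ g ∈ (PySem.List.pyRange 1 n 1).map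
      (fun i => pvGap (PySem.List.sorted _list (fun x => x) false) i), g = 0 := by
    intro g hg
    have := pv_gaps_nonneg _list n hlen g hg
    have := hnp g hg
    omega
  set s := PySem.List.sorted _list (fun x => x) false with hsdef
  have hslen : s.length = _list.length := PySem.List.length_sorted _ _ _
  -- consecutive entries of the first n are equal
  have hstep : ∀ j : Nat, 1 ≤ j → (j : Int) < n → s.getD j 0 = s.getD (j - 1) 0 := by
    intro j hj1 hj2
    have hmem : (j : Int) ∈ PySem.List.pyRange 1 n 1 := by
      rw [PySem.List.mem_pyRange_one]
      omega
    have hg := hz _ (List.mem_map.mpr ⟨(j : Int), hmem, rfl⟩)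
    have hcast : (j : Int) - 1 = ((j - 1 : Nat) : Int) := by omega
    rw [pvGap, hcast, PySem.List.pyGetD_natCast, PySem.List.pyGetD_natCast] at hg
    omega
  have hconst : ∀ j : Nat, (j : Int) < n → s.getD j 0 = s.getD 0 0 := by
    intro j
    induction j with
    | zero => intro _; rfl
    | succ j ih =>
      intro hj
      have h1 := hstep (j + 1) (by omega) (by omega)
      have h2 := ih (by omega)
      simp only [Nat.add_sub_cancel] at h1
      rw [h1]
      exact h2
  -- head of s is x
  obtain ⟨m0, t0, hs0⟩ : ∃ m0 t0, s = m0 :: t0 := by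
    cases h : s with
    | nil => rw [h] at hslen; simp at hslen; omega
    | cons a l => exact ⟨a, l, rfl⟩
  have hm0 : m0 = x := by
    have hm0s : m0 ∈ PySem.List.sorted _list (fun x => x) false := by
      rw [← hsdef, hs0]; simp
    have hxm : x ≤ m0 := hmin m0 ((PySem.List.mem_sorted _ _ _ _).mp hm0s)
    have hmx : m0 ≤ x := by
      have := PySem.List.key_head_sorted_le _list (fun x : Int => x) hs0
      simpa using this x hx
    omega
  have hhead : s.getD 0 0 = x := by rw [hs0, hm0]; rfl
  -- the first n entries of s are all x, so count x s ≥ n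
  have htake : s.take n.toNat = List.replicate n.toNat x := by
    apply List.ext_getElem
    · rw [List.length_take_of_le (by omega), List.length_replicate]
    · intro i h1 h2
      rw [List.getElem_take, List.getElem_replicate]
      have : s.getD i 0 = x := by
        rw [hconst i (by rw [List.length_take] at h1; omega), hhead]
      rw [List.getD_eq_getElem _ _ (by rw [List.length_take] at h1; omega)] at this
      exact this
  have hge : n.toNat ≤ s.count x := by
    have h1 : (s.take n.toNat).count x = n.toNat := by
      rw [htake, List.count_replicate_self]
    have h2 := (List.take_sublist n.toNat s).count_le x
    omega
  have hscnt : s.count x = _list.count x := (PySem.List.sorted_perm _ _ _).count_eq x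
  omega

-- ===== VERDICT (by name: the statement is the Claim_ definition above) =====
theorem solve_spec : Claim_unchanged_solve := by
  intro _list n k _hDom hPre
  unfold Spec_solve
  intro hD
  by_cases hnk : n ≤ k
  · simp [solve, solve_alt, hnk]
  · rw [pv_solveA _list n k hnk, pv_solveB _list n k hnk]
    by_cases hcase : 1 ≤ k ∨ n + k ≤ 2
    · exact pv_main _ n k hnk
        (by rw [List.length_map, PySem.List.length_pyRange_one]) hcase
    · -- k ≤ 0 and 2 < n + k: since the input is outside D_solve, the first n sorted
      -- coordinates are all equal, every gap is 0, and both sides are 0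
      unfold D_solve at hD
      push_neg at hcase
      obtain ⟨hk1, hnk2⟩ := hcase
      have hn3 : 3 ≤ n := by omega
      have hlen : n ≤ (_list.length : Int) := by
        unfold Pre_solve at hPre
        rcases hPre with h | h | h
        · omega
        · exact h
        · omega
      obtain ⟨m0, t0, hs0⟩ : ∃ m0 t0,
          PySem.List.sorted _list (fun x => x) false = m0 :: t0 := by
        cases h : PySem.List.sorted _list (fun x => x) false with
        | nil =>
          have := (PySem.List.sorted_eq_nil_iff _list (fun x => x) false).mp h
          subst this
          simp at hlen
          omega
        | cons a l => exact ⟨a, l, rfl⟩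
      have hm0s : m0 ∈ PySem.List.sorted _list (fun x => x) false := by
        rw [hs0]; simp
      have hm0mem : m0 ∈ _list := (PySem.List.mem_sorted _ _ _ _).mp hm0s
      have hm0min : ∀ y ∈ _list, m0 ≤ y := by
        have := PySem.List.key_head_sorted_le _list (fun x : Int => x) hs0
        simpa using this
      have hcnt : n ≤ (_list.count m0 : Int) := by
        by_contra hc
        exact hD ⟨by omega, by omega, ⟨m0, hm0mem, hm0min, by omega⟩⟩
      exact pv_zero_main _ n k (pv_gaps_zero _list n hlen m0 hm0mem hm0min hcnt)

theorem solve_tight : Claim_exact_solve := by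
  intro _list n k _hDom hPre hD
  unfold D_solve at hD
  obtain ⟨hk0, hnk2, x, hx, hmin, hcnt⟩ := hD
  have hn3 : 3 ≤ n := by omega
  have hnk : ¬ n ≤ k := by omega
  have hlen : n ≤ (_list.length : Int) := by
    unfold Pre_solve at hPre
    rcases hPre with h | h | h
    · omega
    · exact h
    · omega
  rw [pv_solveA _list n k hnk, pv_solveB _list n k hnk]
  set s := PySem.List.sorted _list (fun x => x) false with hsdef
  set G := (PySem.List.pyRange 1 n 1).map (fun i => pvGap s i) with hGdef
  have hGlen : G.length = (n - 1).toNat := by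
    rw [hGdef, List.length_map, PySem.List.length_pyRange_one]
  set asc := PySem.List.sorted G (fun x => x) false with hascdef
  set dsc := PySem.List.sorted G (fun x => x) true with hdscdef
  have hasclen : asc.length = G.length := PySem.List.length_sorted _ _ _
  have hdsclen : dsc.length = G.length := PySem.List.length_sorted _ _ _
  have hascsum : asc.sum = G.sum := (PySem.List.sorted_perm _ _ _).sum_eq
  have hdscsum : dsc.sum = G.sum := (PySem.List.sorted_perm _ _ _).sum_eq
  have hB : (asc.take (n - k).toNat).sum = G.sum := by
    rw [List.take_of_length_le (by omega), hascsum]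
  have hkl : k - 1 = -(((1 - k).toNat : Int)) := by omega
  rw [PySem.List.slice_some_none, hkl,
    PySem.List.clampIdx_neg_natCast _ _ (by omega), hB]
  set dcl := dsc.length - (1 - k).toNat with hdcldef
  have hdcl1 : 1 ≤ dcl := by omega
  have hnn : ∀ g ∈ G, 0 ≤ g := pv_gaps_nonneg _list n hlen
  obtain ⟨g0, hg0G, hg0pos⟩ := pv_exists_pos_gap _list n hlen hn3 x hx hmin hcnt
  obtain ⟨d0, dt, hdsc⟩ : ∃ d0 dt, dsc = d0 :: dt := by
    cases h : dsc with
    | nil => rw [h] at hdsclen; simp at hdsclen; omega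
    | cons a l => exact ⟨a, l, rfl⟩
  have hd0 : g0 ≤ d0 := by
    have := PySem.List.key_head_sorted_rev_ge G (fun x : Int => x) hdsc
    simpa using this g0 hg0G
  have htakepos : 0 < (dsc.take dcl).sum := by
    obtain ⟨j, hj⟩ : ∃ j, dcl = j + 1 := ⟨dcl - 1, by omega⟩
    rw [hdsc, hj, List.take_succ_cons, List.sum_cons]
    have hrest : 0 ≤ (dt.take j).sum := by
      apply List.sum_nonneg
      intro y hy
      have hyd : y ∈ PySem.List.sorted G (fun x => x) true := by
        rw [← hdscdef, hdsc]
        exact List.mem_cons_of_mem _ (List.mem_of_mem_take hy)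
      exact hnn y ((PySem.List.mem_sorted _ _ _ _).mp hyd)
    omega
  have hsplit : (dsc.take dcl).sum + (dsc.drop dcl).sum = dsc.sum :=
    List.sum_take_add_sum_drop dsc dcl
  intro heq
  omega

theorem solve_changed : Claim_changed_solve := by
  unfold Claim_changed_solve
  refine ⟨by decide, by decide, by decide, by decide, ?_, by decide⟩
  show solve_alt [0, 1, 3] 3 0 = 3
  have h : solve_alt [0, 1, 3] 3 0
      = pvSumSmallest ((PySem.List.pyRange 1 3 1).map
          (fun i => pvGap (PySem.List.sorted [0, 1, 3] (fun x => x) false) i)) (3 - 0) := by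
    simp only [solve_alt]
    rw [if_neg (by decide)]
  rw [h, pv_ssum_eq 2 _ (by decide) _]
  decide
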